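-- pv_equiv track=rewrite | github.com/april825/Hurricane-Analysis-Project | Hurricane Analysis Project - Dictionary.py | dam_scale
-- ===== SOURCE A (Python) =====
-- def dam_scale(damage):
--     hurricane_by_damScale = {}
--     damage_scale = {0: 0,
--                     1: 100000000,
--                     2: 1000000000,
--                     3: 10000000000,
--                     4: 50000000000}
--     scales = sorted(damage_scale.keys(),reverse=1)[1:]
--     if type(damage) == str:
--         return damage
--     else:
--         for scale in scales:
--             if damage > damage_scale[scale]:
--                 return scale+1
--         return 0
-- ===== SOURCE B (Python) =====
-- import bisect
--
-- _THRESHOLDS = [0, 100000000, 1000000000, 10000000000]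
--
-- def dam_scale(damage):
--     if type(damage) == str:
--         return damage
--     return bisect.bisect_left(_THRESHOLDS, damage)
-- ===== Notes on version B (the rewrite author's own statement) =====
-- stated objective: idiomatic
-- what changed: Replaced the dict-plus-sorted-descending scan with early returns by a single bisect_left binary search over the ascending threshold table (index = number of thresholds strictly below damage).
import Mathlib
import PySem

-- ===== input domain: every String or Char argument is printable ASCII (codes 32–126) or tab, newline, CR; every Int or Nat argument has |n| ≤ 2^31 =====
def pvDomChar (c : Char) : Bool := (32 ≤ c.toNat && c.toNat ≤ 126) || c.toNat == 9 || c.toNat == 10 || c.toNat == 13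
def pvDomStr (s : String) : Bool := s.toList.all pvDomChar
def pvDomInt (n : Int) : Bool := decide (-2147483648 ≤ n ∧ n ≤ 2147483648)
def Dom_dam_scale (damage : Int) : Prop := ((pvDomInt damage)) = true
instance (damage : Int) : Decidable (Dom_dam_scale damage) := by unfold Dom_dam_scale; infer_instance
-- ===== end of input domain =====

-- B replaces A's descending scan over a dict with a bisect_left binary search into an
-- ascending threshold table (idiomatic; equal value on every Int; the str branch is
-- outside the Int signature).

-- ===== PORT A =====
-- the loop 'for scale in scales: if damage > damage_scale[scale]: return scale+1 / return 0'
def damLoopA (damage : Int) (d : PySem.Dict Int Int) : List Int → Int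
  | [] => 0
  | s :: rest =>
      -- damage_scale[scale]: key always present here, so getD is exact (KeyError impossible)
      if damage > d.getD s 0 then s + 1 else damLoopA damage d rest

def dam_scale (damage : Int) : Int :=
  let damage_scale : PySem.Dict Int Int :=
    PySem.Dict.ofList [(0, 0), (1, 100000000), (2, 1000000000), (3, 10000000000), (4, 50000000000)]
  let scales : List Int :=
    PySem.List.slice (PySem.List.sorted damage_scale.keys (fun k => k) true) (some 1) none
  damLoopA damage damage_scale scales

-- ===== PORT B =====
def dam_scale_alt (damage : Int) : Int :=
  PySem.List.bisectLeft [(0 : Int), 100000000, 1000000000, 10000000000] damage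

-- ===== PRECONDITION & SPEC =====
def Spec_dam_scale (damage : Int) (out : Int) : Prop := out = dam_scale_alt damage
instance (damage : Int) (out : Int) : Decidable (Spec_dam_scale damage out) := by unfold Spec_dam_scale; infer_instance

-- ===== CLAIM (what is proved, stated in full; the proofs are below) =====
def Claim_equal_dam_scale : Prop := ∀ (damage : Int), Dom_dam_scale damage → Spec_dam_scale damage (dam_scale damage)

-- ===== LEMMAS AND PROOFS =====

-- ===== VERDICT (by name: the statement is the Claim_ definition above) =====
theorem dam_scale_spec : Claim_equal_dam_scale := by
  intro damage _
  unfold Spec_dam_scale dam_scale dam_scale_alt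
  dsimp only
  rw [show PySem.List.slice
        (PySem.List.sorted
          (PySem.Dict.ofList [((0 : Int), (0 : Int)), (1, 100000000), (2, 1000000000),
            (3, 10000000000), (4, 50000000000)]).keys (fun k => k) true) (some 1) none
      = [3, 2, 1, 0] from by decide]
  norm_num [damLoopA, PySem.List.bisectLeft, PySem.List.bisectLeftLoop,
    PySem.Dict.getD, PySem.Dict.get?, PySem.Dict.ofList, PySem.Dict.update,
    PySem.Dict.insert, PySem.Dict.empty, List.foldl]
  split_ifs <;> omega
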